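-- pv_equiv track=rewrite | github.com/trofik00777/LawDocsChecker | ml/models/rec_forest.py | hard_requirements
-- ===== SOURCE A (Python) =====
-- def hard_requirements(x):
--     """
--         Принимает номера классов в документе, возвращает словарь вида
--         Причина: массив классов, которых не хватает
--         """
--     result = {}
--     for cls in x:
--         if cls == 2 and not (27 in x):
--             result['Cубсидия предоставляется в целях реализации такого проекта, программы'] = [27]
--         if cls == 23 and not (6 in x):
--             result['Получатель субсидии определяется по результатам отбора'] = [6]
--         if cls == 26 and not (38 in x):
--             result[
--                 'Субсидия предоставляется на развитие инновационной деятельности предусматривают последующее предоставление средств иным лицам, в соответствии с главой IV.1 Федерального закона «О науке и государственной научно-технической политике»'] = [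
--                 38]
--         if (cls == 31 or cls == 32) and (30 in x):
--             result['Субсидия предоставляется на финансовое обеспечение затрат'] = [30]
--         if (cls == 33 or cls == 34 or cls == 4):
--             temp = [10]
--             if not (33 in x):
--                 temp.append(33)
--             if not (34 in x):
--                 temp.append(34)
--             if not (4 in x):
--                 temp.append(4)
--             result[
--                 'Предусматривается либо в порядке финансового обеспечения затрат либо возмещения затрат (недополученных доходов)'] = temp
--     return result
-- ===== SOURCE B (Python) =====
-- K1 = 'Cубсидия предоставляется в целях реализации такого проекта, программы'
-- K2 = 'Получатель субсидии определяется по результатам отбора'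
-- K3 = 'Субсидия предоставляется на развитие инновационной деятельности предусматривают последующее предоставление средств иным лицам, в соответствии с главой IV.1 Федерального закона «О науке и государственной научно-технической политике»'
-- K4 = 'Субсидия предоставляется на финансовое обеспечение затрат'
-- K5 = 'Предусматривается либо в порядке финансового обеспечения затрат либо возмещения затрат (недополученных доходов)'
--
--
-- def hard_requirements(x):
--     """Табличная версия: по множеству классов один раз строим таблицу
--     триггер -> (причина, недостающие классы), затем одним проходом по x
--     заполняем результат."""
--     present = set(x)
--     rules = {}
--     if 27 not in present:
--         rules[2] = (K1, [27])
--     if 6 not in present: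
--         rules[23] = (K2, [6])
--     if 38 not in present:
--         rules[26] = (K3, [38])
--     if 30 in present:
--         rules[31] = (K4, [30])
--         rules[32] = (K4, [30])
--     missing = [10] + [c for c in (33, 34, 4) if c not in present]
--     for c in (33, 34, 4):
--         rules[c] = (K5, missing)
--
--     result = {}
--     for cls in x:
--         if cls in rules:
--             key, val = rules[cls]
--             result[key] = val
--     return result
-- ===== Notes on version B (the rewrite author's own statement) =====
-- stated objective: alternative
-- what changed: Instead of testing each element of x against every rule with repeated 'in x' scans inside the loop, B precomputes set(x) and a lookup table (trigger class -> (reason, missing classes)) once, then fills the result in one pass with a single dict lookup per element.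
import Mathlib
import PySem

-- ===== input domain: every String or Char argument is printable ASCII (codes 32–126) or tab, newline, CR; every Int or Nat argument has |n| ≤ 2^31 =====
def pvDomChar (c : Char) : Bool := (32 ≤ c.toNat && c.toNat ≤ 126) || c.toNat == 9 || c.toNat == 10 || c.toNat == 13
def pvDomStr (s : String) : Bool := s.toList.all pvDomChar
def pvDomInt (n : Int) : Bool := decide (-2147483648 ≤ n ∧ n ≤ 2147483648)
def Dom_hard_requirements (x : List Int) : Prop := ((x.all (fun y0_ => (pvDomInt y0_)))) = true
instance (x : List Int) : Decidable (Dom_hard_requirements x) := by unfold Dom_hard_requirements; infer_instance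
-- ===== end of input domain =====

-- B replaces A's per-element chain of value tests with repeated 'in x' scans by a
-- table built once (trigger class -> (reason, missing classes), memberships against
-- set(x)) and one pass over x doing a single table lookup per element; same value.

-- the five reason strings (shared constants of both programs)
def kStr1 : String := "Cубсидия предоставляется в целях реализации такого проекта, программы"
def kStr2 : String := "Получатель субсидии определяется по результатам отбора"
def kStr3 : String := "Субсидия предоставляется на развитие инновационной деятельности предусматривают последующее предоставление средств иным лицам, в соответствии с главой IV.1 Федерального закона «О науке и государственной научно-технической политике»"
def kStr4 : String := "Субсидия предоставляется на финансовое обеспечение затрат"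
def kStr5 : String := "Предусматривается либо в порядке финансового обеспечения затрат либо возмещения затрат (недополученных доходов)"

-- ===== PORT A =====
-- the body of A's 'for cls in x' loop
def stepA (x : List Int) (result : PySem.Dict String (List Int)) (cls : Int) : PySem.Dict String (List Int) :=
  let result := if cls == 2 && !(x.contains 27) then result.insert kStr1 [27] else result
  let result := if cls == 23 && !(x.contains 6) then result.insert kStr2 [6] else result
  let result := if cls == 26 && !(x.contains 38) then result.insert kStr3 [38] else result
  let result := if (cls == 31 || cls == 32) && x.contains 30 then result.insert kStr4 [30] else result
  if cls == 33 || cls == 34 || cls == 4 then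
    let temp : List Int := [10]
    let temp := if !(x.contains 33) then temp ++ [33] else temp
    let temp := if !(x.contains 34) then temp ++ [34] else temp
    let temp := if !(x.contains 4) then temp ++ [4] else temp
    result.insert kStr5 temp
  else result

def hard_requirements (x : List Int) : List (String × List Int) :=
  (x.foldl (stepA x) PySem.Dict.empty).items

-- ===== PORT B =====
-- the table 'rules' built before the pass: trigger class -> (reason, missing classes)
def buildRules (x : List Int) : PySem.Dict Int (String × List Int) :=
  let present : PySem.Set Int := PySem.Set.ofList x
  let rules : PySem.Dict Int (String × List Int) := PySem.Dict.empty
  let rules := if !(PySem.Set.contains present 27) then rules.insert 2 (kStr1, [27]) else rules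
  let rules := if !(PySem.Set.contains present 6) then rules.insert 23 (kStr2, [6]) else rules
  let rules := if !(PySem.Set.contains present 38) then rules.insert 26 (kStr3, [38]) else rules
  let rules := if PySem.Set.contains present 30 then (rules.insert 31 (kStr4, [30])).insert 32 (kStr4, [30]) else rules
  let missing : List Int := [10] ++ ([33, 34, 4] : List Int).filter (fun c => !(PySem.Set.contains present c))
  ([33, 34, 4] : List Int).foldl (fun r c => r.insert c (kStr5, missing)) rules

def hard_requirements_alt (x : List Int) : List (String × List Int) :=
  let rules := buildRules x
  (x.foldl (fun result cls =>
      match rules.get? cls with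
      | some kv => result.insert kv.1 kv.2
      | none => result) PySem.Dict.empty).items

-- ===== PRECONDITION & SPEC =====
def Spec_hard_requirements (x : List Int) (out : List (String × List Int)) : Prop := out = hard_requirements_alt x
instance (x : List Int) (out : List (String × List Int)) : Decidable (Spec_hard_requirements x out) := by unfold Spec_hard_requirements; infer_instance

-- ===== CLAIM (what is proved, stated in full; the proofs are below) =====
def Claim_equal_hard_requirements : Prop := ∀ (x : List Int), Dom_hard_requirements x → Spec_hard_requirements x (hard_requirements x)

-- ===== LEMMAS AND PROOFS =====

-- value of A's rule-5 'temp' as a function of x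
def tempv (x : List Int) : List Int := [10] ++ ([33, 34, 4] : List Int).filter (fun c => !(x.contains c))

-- what one element cls of x contributes in A's loop (key, value), if anything
def fire (x : List Int) (cls : Int) : Option (String × List Int) :=
  if cls == 2 && !(x.contains 27) then some (kStr1, [27])
  else if cls == 23 && !(x.contains 6) then some (kStr2, [6])
  else if cls == 26 && !(x.contains 38) then some (kStr3, [38])
  else if (cls == 31 || cls == 32) && x.contains 30 then some (kStr4, [30])
  else if cls == 33 || cls == 34 || cls == 4 then some (kStr5, tempv x)
  else none

lemma stepA_eq_fire (x : List Int) (d : PySem.Dict String (List Int)) (cls : Int) :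
    stepA x d cls = match fire x cls with
      | none => d
      | some kv => d.insert kv.1 kv.2 := by
  unfold stepA fire tempv
  by_cases h2 : cls = 2
  · subst h2; cases hc : x.contains 27 <;> simp
  by_cases h23 : cls = 23
  · subst h23; cases hc : x.contains 6 <;> simp
  by_cases h26 : cls = 26
  · subst h26; cases hc : x.contains 38 <;> simp
  by_cases h31 : cls = 31
  · subst h31; cases hc : x.contains 30 <;> simp
  by_cases h32 : cls = 32
  · subst h32; cases hc : x.contains 30 <;> simp
  by_cases h33 : cls = 33
  · subst h33
    by_cases ha : (33 : Int) ∈ x <;> by_cases hb : (34 : Int) ∈ x <;> by_cases hcc : (4 : Int) ∈ x <;>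
      simp [ha, hb, hcc]
  by_cases h34 : cls = 34
  · subst h34
    by_cases ha : (33 : Int) ∈ x <;> by_cases hb : (34 : Int) ∈ x <;> by_cases hcc : (4 : Int) ∈ x <;>
      simp [ha, hb, hcc]
  by_cases h4 : cls = 4
  · subst h4
    by_cases ha : (33 : Int) ∈ x <;> by_cases hb : (34 : Int) ∈ x <;> by_cases hcc : (4 : Int) ∈ x <;>
      simp [ha, hb, hcc]
  simp [h2, h23, h26, h31, h32, h33, h34, h4]

lemma setContains_ofList (x : List Int) (c : Int) :
    PySem.Set.contains (PySem.Set.ofList x) c = x.contains c := by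
  by_cases h : c ∈ x <;>
    simp [PySem.Set.contains_eq_listContains, PySem.Set.mem_ofList, h]

-- what the table holds at cls is exactly what A's loop body contributes for cls
set_option maxHeartbeats 1000000 in
lemma get?_buildRules (x : List Int) (cls : Int) :
    (buildRules x).get? cls = fire x cls := by
  unfold buildRules fire tempv
  simp only [List.foldl_cons, List.foldl_nil, setContains_ofList]
  cases hc27 : x.contains 27 <;> cases hc6 : x.contains 6 <;>
    cases hc38 : x.contains 38 <;> cases hc30 : x.contains 30 <;>
    simp only [hc27, hc6, hc38, hc30, Bool.not_true, Bool.not_false, Bool.and_true, Bool.and_false,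
      Bool.or_false, Bool.false_eq_true, Bool.true_eq_false, if_true, if_false, ite_true, ite_false,
      beq_iff_eq, Bool.or_eq_true, Bool.and_eq_true, decide_eq_true_eq,
      List.singleton_append, List.cons_append, List.nil_append,
      PySem.Dict.get?_insert, PySem.Dict.get?_empty] <;>
    split_ifs <;> first | rfl | omega

-- ===== VERDICT (by name: the statement is the Claim_ definition above) =====
theorem hard_requirements_spec : Claim_equal_hard_requirements := by
  intro x _
  show hard_requirements x = hard_requirements_alt x
  unfold hard_requirements hard_requirements_alt
  have hf : stepA x = fun result cls =>
      match (buildRules x).get? cls with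
      | some kv => result.insert kv.1 kv.2
      | none => result := by
    funext result cls
    rw [stepA_eq_fire, get?_buildRules]
    cases fire x cls <;> rfl
  rw [hf]
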